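-- pv_equiv track=rewrite | github.com/Minerstove/Python | cs11/Lab5/Lab5b_better.py | movie_count
-- ===== SOURCE A (Python) =====
-- def movie_count(mins,cost,b1,b2):
--     s_cost = sorted(cost)
--     result = 0
--
--     for m in mins:
--
--         L = ceil_div(b1, 60 * m)
--         U = floor_div(b2, 60 * m)
--         if L > U:
--             continue
--         i = lower_bound(s_cost, L)
--         j = upper_bound(s_cost, U)
--         result += (j - i)
--
--     return result
--
-- def lower_bound(things, bound):
--     lo, hi = 0, len(things)
--     while lo < hi:
--         mid = (lo + hi) // 2
--         if things[mid] < bound: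
--             lo = mid + 1
--         else:
--             hi = mid
--     return lo
--
-- def upper_bound(things, bound):
--     lo, hi = 0, len(things)
--     while lo < hi:
--         mid = (lo + hi) // 2
--         if things[mid] <= bound:
--             lo = mid + 1
--         else:
--             hi = mid
--     return lo
--
-- def ceil_div(a, b):
--     return -(-a // b)
--
-- def floor_div(a, b):
--     return a // b
-- ===== SOURCE B (Python) =====
-- def movie_count(mins, cost, b1, b2):
--     result = 0
--     for m in mins:
--         d = 60 * m
--         L = -(-b1 // d)
--         U = b2 // d
--         if L <= U:
--             result += sum(1 for c in cost if L <= c <= U)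
--     return result
-- ===== Notes on version B (the rewrite author's own statement) =====
-- stated objective: simpler
-- what changed: Replaces sort + two hand-written binary searches per movie with a direct single scan of the unsorted cost list counting L <= c <= U; same integer bound arithmetic.
import Mathlib
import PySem

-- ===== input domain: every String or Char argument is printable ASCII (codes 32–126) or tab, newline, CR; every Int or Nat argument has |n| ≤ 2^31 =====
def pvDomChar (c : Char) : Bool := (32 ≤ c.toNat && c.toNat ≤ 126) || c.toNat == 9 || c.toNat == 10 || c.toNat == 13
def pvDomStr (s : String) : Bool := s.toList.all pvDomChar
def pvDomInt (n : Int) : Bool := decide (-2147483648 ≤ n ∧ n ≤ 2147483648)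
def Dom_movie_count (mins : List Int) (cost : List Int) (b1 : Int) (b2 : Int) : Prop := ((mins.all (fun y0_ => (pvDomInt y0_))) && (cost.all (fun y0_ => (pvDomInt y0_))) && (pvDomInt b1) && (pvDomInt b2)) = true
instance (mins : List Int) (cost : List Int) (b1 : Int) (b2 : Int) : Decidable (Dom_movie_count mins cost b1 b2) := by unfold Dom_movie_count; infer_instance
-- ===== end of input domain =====

-- B replaces A's sort + two binary searches per movie by a direct scan of the unsorted
-- cost list counting L ≤ c ≤ U (objective: simpler; same bound arithmetic, no speed claim).

-- ===== PORT A =====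
-- while lo < hi loop of lower_bound; things[mid] is always in range (lo < hi ≤ len), ported as getD mid 0
def pvLbLoop (things : List Int) (bound : Int) (lo hi : Nat) : Nat :=
  if _h : lo < hi then
    if things.getD ((lo + hi) / 2) 0 < bound then pvLbLoop things bound ((lo + hi) / 2 + 1) hi
    else pvLbLoop things bound lo ((lo + hi) / 2)
  else lo
termination_by hi - lo
decreasing_by all_goals omega

-- while lo < hi loop of upper_bound
def pvUbLoop (things : List Int) (bound : Int) (lo hi : Nat) : Nat :=
  if _h : lo < hi then
    if things.getD ((lo + hi) / 2) 0 ≤ bound then pvUbLoop things bound ((lo + hi) / 2 + 1) hi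
    else pvUbLoop things bound lo ((lo + hi) / 2)
  else lo
termination_by hi - lo
decreasing_by all_goals omega

def pv_lower_bound (things : List Int) (bound : Int) : Nat := pvLbLoop things bound 0 things.length
def pv_upper_bound (things : List Int) (bound : Int) : Nat := pvUbLoop things bound 0 things.length
def pv_ceil_div (a b : Int) : Int := -(PySem.Int.floordiv (-a) b)
def pv_floor_div (a b : Int) : Int := PySem.Int.floordiv a b

def movie_count (mins : List Int) (cost : List Int) (b1 : Int) (b2 : Int) : Int :=
  let s_cost := PySem.List.sorted cost (fun x => x) false
  mins.foldl (fun result m =>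
    let L := pv_ceil_div b1 (60 * m)
    let U := pv_floor_div b2 (60 * m)
    if L > U then result
    else
      let i := pv_lower_bound s_cost L
      let j := pv_upper_bound s_cost U
      result + ((j : Int) - (i : Int))) 0

-- ===== PORT B =====
def movie_count_alt (mins : List Int) (cost : List Int) (b1 : Int) (b2 : Int) : Int :=
  mins.foldl (fun result m =>
    let d := 60 * m
    let L := -(PySem.Int.floordiv (-b1) d)
    let U := PySem.Int.floordiv b2 d
    if L ≤ U then result + (cost.countP (fun c => decide (L ≤ c ∧ c ≤ U)) : Int)
    else result) 0

-- ===== PRECONDITION & SPEC =====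
-- Pre_ excludes only inputs where A (and B alike) raise ZeroDivisionError: some m = 0.
def Pre_movie_count (mins : List Int) (cost : List Int) (b1 : Int) (b2 : Int) : Prop :=
  ∀ m ∈ mins, m ≠ 0
instance (mins : List Int) (cost : List Int) (b1 : Int) (b2 : Int) : Decidable (Pre_movie_count mins cost b1 b2) := by unfold Pre_movie_count; infer_instance
def pvWitness_movie_count : List Int × List Int × Int × Int := ([1, 2], [2, 1, 3], 60, 150)

def Spec_movie_count (mins : List Int) (cost : List Int) (b1 : Int) (b2 : Int) (out : Int) : Prop := out = movie_count_alt mins cost b1 b2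
instance (mins : List Int) (cost : List Int) (b1 : Int) (b2 : Int) (out : Int) : Decidable (Spec_movie_count mins cost b1 b2 out) := by unfold Spec_movie_count; infer_instance

-- ===== CLAIM (what is proved, stated in full; the proofs are below) =====
def Claim_equal_movie_count : Prop := ∀ (mins : List Int) (cost : List Int) (b1 : Int) (b2 : Int), Dom_movie_count mins cost b1 b2 → Pre_movie_count mins cost b1 b2 → Spec_movie_count mins cost b1 b2 (movie_count mins cost b1 b2)

-- ===== LEMMAS AND PROOFS =====

-- On a sorted list, a downward-closed predicate holds exactly on the first countP indices.
theorem countP_char (p : Int → Bool) (hp : ∀ x y : Int, y ≤ x → p x = true → p y = true)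
    (s : List Int) (hs : s.Pairwise (· ≤ ·)) :
    ∀ i, i < s.length → (p (s.getD i 0) = true ↔ i < s.countP p) := by
  induction s with
  | nil => intro i hi; simp at hi
  | cons a t ih =>
    rw [List.pairwise_cons] at hs
    obtain ⟨ha, ht⟩ := hs
    intro i hi
    cases hpa : p a with
    | true =>
      have hc : (a :: t).countP p = t.countP p + 1 := by simp [hpa]
      cases i with
      | zero => simp [hpa, hc]
      | succ n =>
        simp only [List.length_cons, Nat.succ_lt_succ_iff] at hi
        simp only [List.getD_cons_succ, hc]
        rw [ih ht n hi]; omega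
    | false =>
      have hct : t.countP p = 0 := by
        rw [List.countP_eq_zero]
        intro y hy
        intro hpy
        have := hp y a (ha y hy) hpy
        simp [hpa] at this
      have hc : (a :: t).countP p = 0 := by simp [hpa, hct]
      cases i with
      | zero => simp [hpa, hc]
      | succ n =>
        simp only [List.length_cons, Nat.succ_lt_succ_iff] at hi
        simp only [List.getD_cons_succ, hc]
        have hmem : t.getD n 0 ∈ t := by
          rw [List.getD_eq_getElem?_getD, List.getElem?_eq_getElem hi]
          simp [List.getElem_mem]
        constructor
        · intro hpy
          have := hp _ a (ha _ hmem) hpy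
          simp [hpa] at this
        · omega

theorem pvLbLoop_eq (things : List Int) (b : Int) (k : Nat)
    (hk : ∀ i, i < things.length → ((things.getD i 0 < b) ↔ i < k)) :
    ∀ lo hi, lo ≤ k → k ≤ hi → hi ≤ things.length → pvLbLoop things b lo hi = k := by
  intro lo hi
  induction lo, hi using pvLbLoop.induct things b with
  | case1 lo hi h hlt ih =>
    intro h1 h2 h3
    rw [pvLbLoop]
    simp only [dif_pos h, if_pos hlt]
    have hm : (lo + hi) / 2 < things.length := by omega
    have := (hk _ hm).mp hlt
    exact ih (by omega) h2 h3
  | case2 lo hi h hge ih =>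
    intro h1 h2 h3
    rw [pvLbLoop]
    simp only [dif_pos h, if_neg hge]
    have hm : (lo + hi) / 2 < things.length := by omega
    have := (hk _ hm).not.mp hge
    exact ih h1 (by omega) (by omega)
  | case3 lo hi h =>
    intro h1 h2 h3
    rw [pvLbLoop]
    simp only [dif_neg h]
    omega

theorem pvUbLoop_eq (things : List Int) (b : Int) (k : Nat)
    (hk : ∀ i, i < things.length → ((things.getD i 0 ≤ b) ↔ i < k)) :
    ∀ lo hi, lo ≤ k → k ≤ hi → hi ≤ things.length → pvUbLoop things b lo hi = k := by
  intro lo hi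
  induction lo, hi using pvUbLoop.induct things b with
  | case1 lo hi h hlt ih =>
    intro h1 h2 h3
    rw [pvUbLoop]
    simp only [dif_pos h, if_pos hlt]
    have hm : (lo + hi) / 2 < things.length := by omega
    have := (hk _ hm).mp hlt
    exact ih (by omega) h2 h3
  | case2 lo hi h hge ih =>
    intro h1 h2 h3
    rw [pvUbLoop]
    simp only [dif_pos h, if_neg hge]
    have hm : (lo + hi) / 2 < things.length := by omega
    have := (hk _ hm).not.mp hge
    exact ih h1 (by omega) (by omega)
  | case3 lo hi h =>
    intro h1 h2 h3
    rw [pvUbLoop]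
    simp only [dif_neg h]
    omega

theorem countP_split (L U : Int) (h : L ≤ U) (s : List Int) :
    s.countP (fun c => decide (c ≤ U)) =
      s.countP (fun c => decide (c < L)) + s.countP (fun c => decide (L ≤ c ∧ c ≤ U)) := by
  induction s with
  | nil => simp
  | cons a t ih =>
    have ha : (if (fun c => decide (c ≤ U)) a = true then 1 else 0)
        = (if (fun c => decide (c < L)) a = true then 1 else 0)
          + (if (fun c => decide (L ≤ c ∧ c ≤ U)) a = true then 1 else 0) := by
      by_cases h1 : a ≤ U <;> by_cases h2 : L ≤ a <;>
        simp [h1, h2, show ¬ a < L ↔ L ≤ a by omega] <;> omega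
    simp only [List.countP_cons, ih, ha]
    omega

-- Per-movie core: binary-search count on the sorted list = direct scan count.
theorem counts_eq (cost : List Int) (L U : Int) (h : L ≤ U) :
    ((pv_upper_bound (PySem.List.sorted cost (fun x => x) false) U : Int)
      - (pv_lower_bound (PySem.List.sorted cost (fun x => x) false) L : Int))
      = (cost.countP (fun c => decide (L ≤ c ∧ c ≤ U)) : Int) := by
  set s := PySem.List.sorted cost (fun x => x) false with hsdef
  have hpw : s.Pairwise (· ≤ ·) := by
    have := PySem.List.sorted_pairwise (xs := cost) (key := fun x => x)
    simpa [← hsdef] using this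
  have hperm : s.Perm cost := PySem.List.sorted_perm cost (fun x => x) false
  have hub : pv_upper_bound s U = s.countP (fun c => decide (c ≤ U)) := by
    unfold pv_upper_bound
    exact pvUbLoop_eq s U _
      (fun i hi => by
        have := countP_char (fun c => decide (c ≤ U))
          (by intro x y hxy hx; simp_all; omega) s hpw i hi
        simpa using this)
      0 s.length (Nat.zero_le _) List.countP_le_length (le_refl _)
  have hlb : pv_lower_bound s L = s.countP (fun c => decide (c < L)) := by
    unfold pv_lower_bound
    exact pvLbLoop_eq s L _
      (fun i hi => by
        have := countP_char (fun c => decide (c < L))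
          (by intro x y hxy hx; simp_all; omega) s hpw i hi
        simpa using this)
      0 s.length (Nat.zero_le _) List.countP_le_length (le_refl _)
  have hsplit := countP_split L U h s
  have hpermc : s.countP (fun c => decide (L ≤ c ∧ c ≤ U))
      = cost.countP (fun c => decide (L ≤ c ∧ c ≤ U)) := hperm.countP_eq _
  rw [hub, hlb, ← hpermc, hsplit]
  push_cast
  ring

-- The loop bodies of the two ports, as named functions (proof helpers).
def stepA (cost : List Int) (b1 b2 result m : Int) : Int :=
  let L := pv_ceil_div b1 (60 * m)
  let U := pv_floor_div b2 (60 * m)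
  if L > U then result
  else
    let i := pv_lower_bound (PySem.List.sorted cost (fun x => x) false) L
    let j := pv_upper_bound (PySem.List.sorted cost (fun x => x) false) U
    result + ((j : Int) - (i : Int))

def stepB (cost : List Int) (b1 b2 result m : Int) : Int :=
  let d := 60 * m
  let L := -(PySem.Int.floordiv (-b1) d)
  let U := PySem.Int.floordiv b2 d
  if L ≤ U then result + (cost.countP (fun c => decide (L ≤ c ∧ c ≤ U)) : Int)
  else result

theorem stepAB (cost : List Int) (b1 b2 : Int) : stepA cost b1 b2 = stepB cost b1 b2 := by
  funext r m
  simp only [stepA, stepB, pv_ceil_div, pv_floor_div]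
  by_cases h : -(PySem.Int.floordiv (-b1) (60 * m)) ≤ PySem.Int.floordiv b2 (60 * m)
  · rw [if_neg (not_lt.mpr h), if_pos h, counts_eq cost _ _ h]
  · rw [if_pos (lt_of_not_ge h), if_neg h]

-- ===== VERDICT (by name: the statement is the Claim_ definition above) =====
theorem movie_count_spec : Claim_equal_movie_count := by
  intro mins cost b1 b2 _hdom _hpre
  show movie_count mins cost b1 b2 = movie_count_alt mins cost b1 b2
  have hA : movie_count mins cost b1 b2 = mins.foldl (stepA cost b1 b2) 0 := rfl
  have hB : movie_count_alt mins cost b1 b2 = mins.foldl (stepB cost b1 b2) 0 := rfl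
  rw [hA, hB, stepAB]
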